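-- pv_equiv track=rewrite | github.com/bohdanvan/advent-of-code | src/advent_of_code_2022/day5/day5.py | matrix_to_stacks
-- ===== SOURCE A (Python) =====
-- from typing import List, Optional, TypedDict
--
-- def matrix_to_stacks(matrix: List[List[Optional[str]]]) -> List[List[str]]:
--     stacks: List[List[str]] = []
--     for j in range(len(matrix[0])):
--         stack: List[str] = []
--         for i in reversed(range(len(matrix))):
--             val = matrix[i][j]
--             if val:
--                 stack.append(val)
--         stacks.append(stack)
--     return stacks
-- ===== SOURCE B (Python) =====
-- def matrix_to_stacks(matrix):
--     stacks = [[] for _ in range(len(matrix[0]))]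
--     for i in range(len(matrix)):
--         for j in range(len(matrix[0])):
--             val = matrix[i][j]
--             if val:
--                 stacks[j].insert(0, val)
--     return stacks
-- ===== Notes on version B (the rewrite author's own statement) =====
-- stated objective: alternative
-- what changed: Replaces the column-major scan that appends values bottom-up into a freshly built stack per column with a single row-major top-down scan that prepends each value into pre-allocated per-column stacks.
import Mathlib
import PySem

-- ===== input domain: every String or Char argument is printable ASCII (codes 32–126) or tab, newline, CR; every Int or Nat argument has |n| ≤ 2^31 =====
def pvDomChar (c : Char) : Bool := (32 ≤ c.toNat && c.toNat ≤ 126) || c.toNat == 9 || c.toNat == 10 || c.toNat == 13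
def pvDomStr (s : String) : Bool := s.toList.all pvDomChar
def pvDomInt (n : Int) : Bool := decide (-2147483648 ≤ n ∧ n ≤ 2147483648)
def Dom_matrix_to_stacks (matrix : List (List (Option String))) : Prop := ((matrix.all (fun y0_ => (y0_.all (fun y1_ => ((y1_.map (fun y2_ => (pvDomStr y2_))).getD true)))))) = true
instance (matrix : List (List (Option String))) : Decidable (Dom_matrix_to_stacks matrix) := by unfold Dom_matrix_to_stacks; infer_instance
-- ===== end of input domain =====

-- B replaces A's column-major bottom-up append scan with a row-major top-down scan that
-- prepends into pre-allocated per-column stks (alternative decomposition, same cost).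

-- ===== PORT A =====
def matrix_to_stacks (matrix : List (List (Option String))) : List (List String) :=
  (PySem.List.pyRange 0 (PySem.List.len (PySem.List.pyGetD matrix 0 [])) 1).foldl
    (fun stks j =>
      stks ++
        [(PySem.List.pyRange 0 (PySem.List.len matrix) 1).reverse.foldl
          (fun stack i =>
            match PySem.List.pyGetD (PySem.List.pyGetD matrix i []) j none with
            | some v => if v ≠ "" then stack ++ [v] else stack
            | none => stack)
          []])
    []

-- ===== PORT B =====
def matrix_to_stacks_alt (matrix : List (List (Option String))) : List (List String) :=
  (PySem.List.pyRange 0 (PySem.List.len matrix) 1).foldl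
    (fun stks i =>
      (PySem.List.pyRange 0 (PySem.List.len (PySem.List.pyGetD matrix 0 [])) 1).foldl
        (fun st j =>
          match PySem.List.pyGetD (PySem.List.pyGetD matrix i []) j none with
          | some v => if v ≠ "" then st.set j.toNat (v :: st.getD j.toNat []) else st
          | none => st)
        stks)
    (List.replicate (PySem.List.pyGetD matrix 0 []).length [])

-- ===== PRECONDITION & SPEC =====
-- Pre_ excludes exactly the inputs where Python raises IndexError: the empty matrix
-- (matrix[0] fails) and matrices with a row shorter than the first row.
def Pre_matrix_to_stacks (matrix : List (List (Option String))) : Prop :=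
  matrix ≠ [] ∧ ∀ row ∈ matrix, (matrix.headD []).length ≤ row.length
instance (matrix : List (List (Option String))) : Decidable (Pre_matrix_to_stacks matrix) := by
  unfold Pre_matrix_to_stacks; infer_instance

def pvWitness_matrix_to_stacks : List (List (Option String)) :=
  [[some "A", none], [some "B", some "C"]]

def Spec_matrix_to_stacks (matrix : List (List (Option String))) (out : List (List String)) : Prop := out = matrix_to_stacks_alt matrix
instance (matrix : List (List (Option String))) (out : List (List String)) : Decidable (Spec_matrix_to_stacks matrix out) := by unfold Spec_matrix_to_stacks; infer_instance

-- ===== CLAIM (what is proved, stated in full; the proofs are below) =====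
def Claim_equal_matrix_to_stacks : Prop := ∀ (matrix : List (List (Option String))), Dom_matrix_to_stacks matrix → Pre_matrix_to_stacks matrix → Spec_matrix_to_stacks matrix (matrix_to_stacks matrix)

-- ===== LEMMAS AND PROOFS =====

-- the truthy-filtered value of column j of one row ("if val:")
def tcol (j : Nat) (row : List (Option String)) : Option String :=
  match row.getD j none with
  | some v => if v ≠ "" then some v else none
  | none => none

-- the common normal form: column j of the result, bottom-up
def colOf (rows : List (List (Option String))) (j : Nat) : List String :=
  (rows.filterMap (tcol j)).reverse

-- appending loop = filterMap (A's inner loop shape)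
theorem foldl_append_tcol (matrix : List (List (Option String))) (j : Nat) :
    ∀ (l : List Nat) (acc : List String),
      l.foldl (fun stack k =>
          match tcol j (matrix.getD k []) with
          | some v => stack ++ [v]
          | none => stack) acc
        = acc ++ l.filterMap (fun k => tcol j (matrix.getD k [])) := by
  intro l
  induction l with
  | nil => intro acc; simp
  | cons x xs ih =>
    intro acc
    cases hx : tcol j (matrix.getD x []) with
    | none => simp only [List.foldl_cons, List.filterMap_cons, hx]; exact ih acc
    | some v => simp only [List.foldl_cons, List.filterMap_cons, hx]; rw [ih]; simp

-- A computes colOf for every column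
theorem portA_eq (matrix : List (List (Option String))) :
    matrix_to_stacks matrix
      = (List.range (matrix.getD 0 []).length).map (colOf matrix) := by
  unfold matrix_to_stacks
  rw [PySem.List.foldl_append_singleton_eq_map]
  simp only [PySem.List.len_eq, PySem.List.pyRange_one, Int.sub_zero, Int.toNat_natCast,
    List.map_map, PySem.List.pyGetD_zero, zero_add]
  refine List.map_congr_left fun j _ => ?_
  simp only [Function.comp_apply]
  rw [← List.map_reverse, List.foldl_map]
  simp only [PySem.List.pyGetD_natCast]
  have hstep : (fun (stack : List String) (k : Nat) =>
      match (matrix.getD k []).getD j none with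
      | some v => if v ≠ "" then stack ++ [v] else stack
      | none => stack)
      = (fun (stack : List String) (k : Nat) =>
        match tcol j (matrix.getD k []) with
        | some v => stack ++ [v]
        | none => stack) := by
    funext stack k
    unfold tcol
    cases h : (matrix.getD k []).getD j none with
    | none => simp
    | some v => by_cases hv : v = "" <;> simp [hv]
  rw [hstep, foldl_append_tcol matrix j]
  rw [List.filterMap_reverse]
  simp only [List.nil_append]
  unfold colOf
  congr 1
  have hmap : (List.range matrix.length).map (fun k => matrix.getD k []) = matrix := by
    apply List.ext_getElem
    · simp
    · intro i h1 h2
      simp [List.getD_eq_getElem?_getD, List.getElem?_eq_getElem h2]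
  calc (List.range matrix.length).filterMap (fun k => tcol j (matrix.getD k []))
      = ((List.range matrix.length).map (fun k => matrix.getD k [])).filterMap (tcol j) := by
        rw [List.filterMap_map]; rfl
    _ = matrix.filterMap (tcol j) := by rw [hmap]

-- B's inner loop: updating each index once, left to right
theorem inner_loop (row : List (Option String)) :
    ∀ (cur pre : List (List String)),
      (List.range' pre.length cur.length).foldl
        (fun st j => match tcol j row with
          | some v => st.set j (v :: st.getD j []) | none => st)
        (pre ++ cur)
      = pre ++ (cur.zipIdx pre.length).map
          (fun p => match tcol p.2 row with | some v => v :: p.1 | none => p.1) := by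
  intro cur
  induction cur with
  | nil => intro pre; simp
  | cons c cs ih =>
    intro pre
    simp only [List.length_cons]
    rw [List.range'_succ, List.foldl_cons]
    have hget : (pre ++ c :: cs).getD pre.length [] = c := by
      simp [List.getD_eq_getElem?_getD]
    have hset : ∀ x, (pre ++ c :: cs).set pre.length x = pre ++ x :: cs := by
      intro x
      rw [List.set_append]
      simp
    have step : (match tcol pre.length row with
        | some v => (pre ++ c :: cs).set pre.length (v :: (pre ++ c :: cs).getD pre.length [])
        | none => (pre ++ c :: cs))
        = (pre ++ [match tcol pre.length row with | some v => v :: c | none => c]) ++ cs := by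
      cases h : tcol pre.length row <;> simp [hset]
    rw [step]
    have hlen : (pre ++ [match tcol pre.length row with | some v => v :: c | none => c]).length
        = pre.length + 1 := by simp
    rw [← hlen, ih]
    simp [List.zipIdx_cons, hlen]

-- B's inner loop on a stks list that is a map over range n
theorem inner_loop_map (row : List (Option String)) (n : Nat) (col : Nat → List String) :
    (List.range n).foldl
      (fun st j => match tcol j row with
        | some v => st.set j (v :: st.getD j []) | none => st)
      ((List.range n).map col)
    = (List.range n).map (fun j => match tcol j row with | some v => v :: col j | none => col j) := by
  have h := inner_loop row ((List.range n).map col) []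
  simp only [List.nil_append, List.length_nil, List.length_map, List.length_range] at h
  rw [List.range_eq_range'] at h ⊢
  rw [h]
  apply List.ext_getElem
  · simp
  · intro i h1 h2
    simp [List.getElem_zipIdx]

-- B's outer loop maintains the per-column invariant
theorem outer_loop (n : Nat) :
    ∀ (rows done : List (List (Option String))),
      rows.foldl
        (fun st row =>
          (List.range n).foldl
            (fun st j => match tcol j row with
              | some v => st.set j (v :: st.getD j []) | none => st)
            st)
        ((List.range n).map (colOf done))
      = (List.range n).map (colOf (done ++ rows)) := by
  intro rows
  induction rows with
  | nil => intro done; simp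
  | cons r rs ih =>
    intro done
    rw [List.foldl_cons, inner_loop_map]
    have hcol : (fun j => match tcol j r with
        | some v => v :: colOf done j | none => colOf done j)
        = colOf (done ++ [r]) := by
      funext j
      unfold colOf
      rw [List.filterMap_append]
      cases h : tcol j r <;> simp [h]
    rw [hcol, ih]
    simp

-- B computes colOf for every column
theorem portB_eq (matrix : List (List (Option String))) :
    matrix_to_stacks_alt matrix
      = (List.range (matrix.getD 0 []).length).map (colOf matrix) := by
  unfold matrix_to_stacks_alt
  simp only [PySem.List.len_eq, PySem.List.pyRange_one, Int.sub_zero, Int.toNat_natCast,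
    List.foldl_map, PySem.List.pyGetD_zero, zero_add, PySem.List.pyGetD_natCast]
  have hstep : (fun (st : List (List String)) (i : Nat) =>
      (List.range (matrix.getD 0 []).length).foldl
        (fun st (j : Nat) =>
          match (matrix.getD i []).getD j none with
          | some v => if v ≠ "" then st.set j (v :: st.getD j []) else st
          | none => st)
        st)
      = (fun (st : List (List String)) (i : Nat) =>
        (List.range (matrix.getD 0 []).length).foldl
          (fun st j => match tcol j (matrix.getD i []) with
            | some v => st.set j (v :: st.getD j []) | none => st)
          st) := by
    funext st i
    have : (fun (st : List (List String)) (j : Nat) =>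
        match (matrix.getD i []).getD j none with
        | some v => if v ≠ "" then st.set j (v :: st.getD j []) else st
        | none => st)
        = (fun (st : List (List String)) (j : Nat) =>
          match tcol j (matrix.getD i []) with
          | some v => st.set j (v :: st.getD j []) | none => st) := by
      funext st' j
      unfold tcol
      cases h : (matrix.getD i []).getD j none with
      | none => simp
      | some v => by_cases hv : v = "" <;> simp [hv]
    rw [this]
  rw [hstep]
  have hfold : (List.range matrix.length).foldl
      (fun (st : List (List String)) (i : Nat) =>
        (List.range (matrix.getD 0 []).length).foldl
          (fun st j => match tcol j (matrix.getD i []) with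
            | some v => st.set j (v :: st.getD j []) | none => st) st)
      (List.replicate (matrix.getD 0 []).length [])
      = ((List.range matrix.length).map (fun i => matrix.getD i [])).foldl
        (fun (st : List (List String)) row =>
          (List.range (matrix.getD 0 []).length).foldl
            (fun st j => match tcol j row with
              | some v => st.set j (v :: st.getD j []) | none => st) st)
        (List.replicate (matrix.getD 0 []).length []) := by
    rw [List.foldl_map]
  rw [hfold]
  have hmap : (List.range matrix.length).map (fun k => matrix.getD k []) = matrix := by
    apply List.ext_getElem
    · simp
    · intro i h1 h2
      simp [List.getD_eq_getElem?_getD, List.getElem?_eq_getElem h2]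
  have hrep : (List.replicate (matrix.getD 0 []).length ([] : List String))
      = (List.range (matrix.getD 0 []).length).map (colOf []) := by
    apply List.ext_getElem <;> simp [colOf]
  rw [hmap, hrep, outer_loop]
  simp

-- ===== VERDICT (by name: the statement is the Claim_ definition above) =====
theorem matrix_to_stacks_spec : Claim_equal_matrix_to_stacks := by
  intro matrix _ _
  unfold Spec_matrix_to_stacks
  rw [portA_eq, portB_eq]
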